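-- pv_equiv track=rewrite | github.com/Jagdkotehok/NeuralAdblocker | backend/neuro_search.py | large_window
-- ===== SOURCE A (Python) =====
-- def large_window(data):
-- 	"""Создание окна на всём отрезке."""
-- 	ans = [[], []]
-- 	for index in range(len(data[0])):
-- 		x = data[0][index]
-- 		y = data[1][index]
-- 		i = 0
-- 		while i < len(y):
-- 			start = i
-- 			text = ''
-- 			while i < len(y):
-- 				if y[i] == y[start]:
-- 					text += x[i] + ' '
-- 					i += 1
-- 				else:
-- 					break
-- 			ans[0].append(text)
-- 			ans[1].append(y[start])
-- 	return ans
-- ===== SOURCE B (Python) =====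
-- def large_window(data):
-- 	"""Two-pass rewrite: first tabulate group boundaries, then materialise segments."""
-- 	texts, labels = [], []
-- 	for x, y in zip(*data[:2]):
-- 		n = len(y)
-- 		bounds = [k for k in range(n + 1) if k == 0 or k == n or y[k] != y[k - 1]]
-- 		for s, e in zip(bounds, bounds[1:]):
-- 			texts.append(''.join(x[k] + ' ' for k in range(s, e)))
-- 			labels.append(y[s])
-- 	return [texts, labels]
-- ===== Notes on version B (the rewrite author's own statement) =====
-- stated objective: alternative
-- what changed: Replaces A's nested while-loops (grow each group while scanning) by two passes per row: first tabulate all group-boundary indices in one comprehension, then materialise each (start, end) segment's joined text and label.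
import Mathlib
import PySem

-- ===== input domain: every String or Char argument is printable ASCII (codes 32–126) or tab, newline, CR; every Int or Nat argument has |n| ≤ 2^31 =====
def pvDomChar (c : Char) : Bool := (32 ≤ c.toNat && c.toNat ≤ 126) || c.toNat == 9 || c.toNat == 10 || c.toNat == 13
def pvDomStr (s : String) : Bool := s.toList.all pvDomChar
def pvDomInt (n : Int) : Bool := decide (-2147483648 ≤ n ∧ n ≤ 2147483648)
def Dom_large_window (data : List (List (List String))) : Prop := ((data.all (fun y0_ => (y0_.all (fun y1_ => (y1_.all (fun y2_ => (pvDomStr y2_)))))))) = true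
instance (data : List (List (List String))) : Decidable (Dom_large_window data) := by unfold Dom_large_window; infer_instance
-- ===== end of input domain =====

-- B replaces A's nested while-loop grouping by a boundary-table pass plus a
-- segment-materialising pass (alternative decomposition, same asymptotic cost).
-- All Python indexing in both ports is rendered with List.getD; this is exact because
-- Pre_large_window admits exactly the inputs on which every index used is in range.

-- ===== PORT A =====
-- inner `while` of A: advance i while y[i] == y[start], accumulating text.
-- The fuel argument only bounds the loop (it is y.length - i at the call site,
-- enough for every iteration); it makes the recursion structural.
def aInner (x y : List String) (start : Nat) : Nat → Nat → String → String × Nat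
  | 0, i, text => (text, i)
  | fuel + 1, i, text =>
    if i < y.length then
      if y.getD i "" == y.getD start "" then
        aInner x y start fuel (i + 1) (text ++ x.getD i "" ++ " ")
      else (text, i)
    else (text, i)

-- outer `while` of A: one row; ans = [texts, labels] threaded like Python's ans.
-- fuel = y.length bounds the outer loop (i strictly increases each iteration).
def aRow (x y : List String) : Nat → Nat → List (List String) → List (List String)
  | 0, _, ans => ans
  | fuel + 1, i, ans =>
    if i < y.length then
      let r := aInner x y i (y.length - i) i ""
      aRow x y fuel r.2 [ans.getD 0 [] ++ [r.1], ans.getD 1 [] ++ [y.getD i ""]]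
    else ans

def large_window (data : List (List (List String))) : List (List String) :=
  (List.range (data.getD 0 []).length).foldl
    (fun ans index =>
      let x := (data.getD 0 []).getD index []
      let y := (data.getD 1 []).getD index []
      aRow x y y.length 0 ans)
    [[], []]

-- ===== PORT B =====
-- boundary table: [k for k in range(n+1) if k == 0 or k == n or y[k] != y[k-1]]
def bBounds (y : List String) : List Nat :=
  (List.range (y.length + 1)).filter
    (fun k => k == 0 || k == y.length || !(y.getD k "" == y.getD (k - 1) ""))

def large_window_alt (data : List (List (List String))) : List (List String) :=
  let r := ((data.getD 0 []).zip (data.getD 1 [])).foldl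
    (fun (acc : List String × List String) (p : List String × List String) =>
      let bs := bBounds p.2
      (bs.zip bs.tail).foldl
        (fun (acc2 : List String × List String) (se : Nat × Nat) =>
          (acc2.1 ++ [String.join ((List.range' se.1 (se.2 - se.1)).map
              (fun k => p.1.getD k "" ++ " "))],
           acc2.2 ++ [p.2.getD se.1 ""]))
        acc)
    ([], [])
  [r.1, r.2]

-- ===== PRECONDITION & SPEC =====
-- Pre_ is exactly the set of inputs on which Python A returns: data nonempty (else data[0]
-- raises IndexError), data[1] at least as long as data[0] (else data[1][index] raises), and
-- every label row no longer than its token row (else x[i] raises IndexError).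
def Pre_large_window (data : List (List (List String))) : Prop :=
  data ≠ [] ∧ (data.headI).length ≤ (data.getD 1 []).length ∧
    ∀ p ∈ (data.headI).zip (data.getD 1 []), (p.2).length ≤ (p.1).length
instance (data : List (List (List String))) : Decidable (Pre_large_window data) := by
  unfold Pre_large_window; infer_instance
def pvWitness_large_window : List (List (List String)) :=
  [[["a", "b", "c"], ["d"]], [["L1", "L1", "L2"], ["L3"]]]
def Spec_large_window (data : List (List (List String))) (out : List (List String)) : Prop := out = large_window_alt data
instance (data : List (List (List String))) (out : List (List String)) : Decidable (Spec_large_window data out) := by unfold Spec_large_window; infer_instance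

-- ===== CLAIM (what is proved, stated in full; the proofs are below) =====
def Claim_equal_large_window : Prop := ∀ (data : List (List (List String))), Dom_large_window data → Pre_large_window data → Spec_large_window data (large_window data)

-- ===== LEMMAS AND PROOFS =====

-- next stop index of A's inner while, as a pure function of y
def nxt (y : List String) (start i : Nat) : Nat :=
  if _h : i < y.length then
    if y.getD i "" == y.getD start "" then nxt y start (i + 1) else i
  else i
termination_by y.length - i

theorem nxt_ge (y : List String) (start i : Nat) : i ≤ nxt y start i := by
  fun_induction nxt y start i <;> omega

theorem nxt_le' (y : List String) (start i : Nat) :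
    nxt y start i ≤ max i y.length := by
  fun_induction nxt y start i <;> omega

theorem nxt_gt (y : List String) (s : Nat) (h : s < y.length) : s < nxt y s s := by
  rw [nxt]
  simp only [h, dite_true, beq_self_eq_true, if_true]
  have := nxt_ge y s (s + 1); omega

theorem nxt_mid (y : List String) (start i : Nat) :
    ∀ k, i ≤ k → k < nxt y start i → y.getD k "" = y.getD start "" := by
  fun_induction nxt y start i with
  | case1 i h1 heq ih =>
      intro k hk1 hk2
      rcases Nat.eq_or_lt_of_le hk1 with h | h
      · subst h; exact eq_of_beq heq
      · exact ih k h hk2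
  | case2 i h1 heq => intro k hk1 hk2; omega
  | case3 i h1 => intro k hk1 hk2; omega

theorem nxt_end (y : List String) (start : Nat) :
    ∀ fuel i, i ≤ y.length → y.length - i ≤ fuel →
      nxt y start i = y.length ∨ y.getD (nxt y start i) "" ≠ y.getD start "" := by
  intro fuel
  induction fuel with
  | zero =>
      intro i h1 h2
      have : i = y.length := by omega
      subst this
      rw [nxt]; simp
  | succ m ih =>
      intro i h1 h2
      rw [nxt]
      by_cases hlt : i < y.length
      · simp only [hlt, dite_true]
        by_cases heq : y.getD i "" == y.getD start ""
        · simp only [heq, if_true]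
          exact ih (i + 1) (by omega) (by omega)
        · simp only [heq, if_false]
          right; simpa using heq
      · simp only [hlt, dite_false]
        left; omega

theorem str_foldl_hoist : ∀ (l : List String) (a : String),
    l.foldl (fun r s => r ++ s) a = a ++ l.foldl (fun r s => r ++ s) "" := by
  intro l
  induction l with
  | nil => intro a; simp
  | cons b l ih => intro a; simp only [List.foldl_cons]; rw [ih (a ++ b), ih ("" ++ b)]; simp [String.append_assoc]

theorem str_join_cons (a : String) (l : List String) :
    String.join (a :: l) = a ++ String.join l := by
  show (a :: l).foldl (fun r s => r ++ s) "" = a ++ l.foldl (fun r s => r ++ s) ""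
  simp only [List.foldl_cons]
  rw [str_foldl_hoist l ("" ++ a)]
  simp

-- the text accumulated over a segment [s, e)
def segText (x : List String) (s e : Nat) : String :=
  String.join ((List.range' s (e - s)).map (fun k => x.getD k "" ++ " "))

theorem aInner_eq (x y : List String) (start : Nat) :
    ∀ fuel i text, y.length - i ≤ fuel →
      aInner x y start fuel i text = (text ++ segText x i (nxt y start i), nxt y start i) := by
  intro fuel
  induction fuel with
  | zero =>
      intro i text h
      have hni : ¬ i < y.length := by omega
      rw [nxt, dif_neg hni]
      simp [aInner, segText, String.join]
  | succ m ih =>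
      intro i text h
      by_cases hlt : i < y.length
      · cases hb : (y.getD i "" == y.getD start "") with
        | true =>
            rw [nxt, dif_pos hlt, hb, if_pos rfl]
            have hstep : aInner x y start (m + 1) i text =
                aInner x y start m (i + 1) (text ++ x.getD i "" ++ " ") := by
              simp only [aInner]
              rw [if_pos hlt, if_pos hb]
            rw [hstep, ih (i + 1) _ (by omega)]
            have hge : i + 1 ≤ nxt y start (i + 1) := nxt_ge y start (i + 1)
            have hr : List.range' i (nxt y start (i + 1) - i) =
                i :: List.range' (i + 1) (nxt y start (i + 1) - (i + 1)) := by
              have h2 : nxt y start (i + 1) - i = (nxt y start (i + 1) - (i + 1)) + 1 := by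
                omega
              rw [h2, List.range'_succ]
            simp [segText, hr, str_join_cons, String.append_assoc]
        | false =>
            rw [nxt, dif_pos hlt, hb, if_neg (by simp : ¬ false = true)]
            have hstep : aInner x y start (m + 1) i text = (text, i) := by
              simp only [aInner]
              rw [if_pos hlt,
                if_neg (show ¬ (y.getD i "" == y.getD start "") = true by rw [hb]; simp)]
            rw [hstep]
            simp [segText, String.join]
      · rw [nxt, dif_neg hlt]
        have hstep : aInner x y start (m + 1) i text = (text, i) := by
          simp only [aInner]
          rw [if_neg hlt]
        rw [hstep]
        simp [segText, String.join]

-- A's stop sequence from s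
def stops (y : List String) (s : Nat) : List Nat :=
  if h : s < y.length then s :: stops y (nxt y s s) else [s]
termination_by y.length - s
decreasing_by
  have h1 := nxt_gt y s h
  have h2 := nxt_le' y s s
  omega

theorem stops_cons (y : List String) (s : Nat) :
    ∃ tl, stops y s = s :: tl := by
  rw [stops]; split
  · exact ⟨_, rfl⟩
  · exact ⟨[], rfl⟩

-- the boolean boundary predicate of bBounds, characterised
theorem bP_iff (y : List String) (k : Nat) :
    ((k == 0 || k == y.length || !(y.getD k "" == y.getD (k - 1) "")) = true) ↔
      (k = 0 ∨ k = y.length ∨ y.getD k "" ≠ y.getD (k - 1) "") := by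
  simp [or_assoc]

-- bBounds' filter, restricted to the suffix starting at a boundary s, is the stop sequence
theorem filt (y : List String) :
    ∀ fuel s, s ≤ y.length → y.length - s ≤ fuel →
      (s = 0 ∨ s = y.length ∨ y.getD s "" ≠ y.getD (s - 1) "") →
      (List.range' s (y.length + 1 - s)).filter
        (fun k => k == 0 || k == y.length || !(y.getD k "" == y.getD (k - 1) "")) =
        stops y s := by
  intro fuel
  induction fuel with
  | zero =>
      intro s h1 h2 hP
      have hs : s = y.length := by omega
      subst hs
      rw [stops]
      simp [show y.length + 1 - y.length = 1 from by omega, List.range'_one]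
  | succ m ih =>
      intro s h1 h2 hP
      by_cases hlt : s < y.length
      · set e := nxt y s s with he
        have hse : s < e := nxt_gt y s hlt
        have hel : e ≤ y.length := by have := nxt_le' y s s; omega
        have hsplit : List.range' s (y.length + 1 - s) =
            List.range' s (e - s) ++ List.range' e (y.length + 1 - e) := by
          have hh := @List.range'_append s (e - s) (y.length + 1 - e) 1
          rw [show s + 1 * (e - s) = e from by omega,
              show (e - s) + (y.length + 1 - e) = y.length + 1 - s from by omega] at hh
          exact hh.symm
        have hmid : ∀ k, s ≤ k → k < e → y.getD k "" = y.getD s "" :=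
          nxt_mid y s s
        have hPe : (e = 0 ∨ e = y.length ∨ y.getD e "" ≠ y.getD (e - 1) "") := by
          rcases nxt_end y s (y.length) s (by omega) (by omega) with hn | hne
          · right; left; exact hn
          · right; right
            have h1' : y.getD (e - 1) "" = y.getD s "" := hmid (e - 1) (by omega) (by omega)
            rw [h1']; exact hne
        have hchunk : (List.range' s (e - s)).filter
            (fun k => k == 0 || k == y.length || !(y.getD k "" == y.getD (k - 1) "")) = [s] := by
          have hr : List.range' s (e - s) = s :: List.range' (s + 1) (e - s - 1) := by
            have : e - s = (e - s - 1) + 1 := by omega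
            rw [this, List.range'_succ]
            simp
          rw [hr, List.filter_cons]
          rw [if_pos (by rw [bP_iff]; exact hP)]
          congr 1
          rw [List.filter_eq_nil_iff]
          intro k hk
          rw [List.mem_range'] at hk
          obtain ⟨hk1, hk2⟩ := hk
          simp only [Bool.not_eq_true, Bool.or_eq_false_iff]
          refine ⟨⟨?_, ?_⟩, ?_⟩
          · simp only [beq_eq_false_iff_ne]; omega
          · simp only [beq_eq_false_iff_ne]; omega
          · have e1 : y.getD k "" = y.getD s "" := hmid k (by omega) (by omega)
            have e2 : y.getD (k - 1) "" = y.getD s "" := hmid (k - 1) (by omega) (by omega)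
            have e3 := e1.trans e2.symm
            simp only [List.getD_eq_getElem?_getD] at e3
            simp [e3]
        rw [hsplit, List.filter_append, hchunk, ih e hel (by omega) hPe]
        conv_rhs => rw [stops]
        simp only [hlt, dite_true, List.singleton_append]
        rw [he]
      · have hs : s = y.length := by omega
        subst hs
        rw [stops]
        simp [show y.length + 1 - y.length = 1 from by omega, List.range'_one]

theorem bounds_eq_stops (y : List String) : bBounds y = stops y 0 := by
  unfold bBounds
  rw [List.range_eq_range']
  have := filt y y.length 0 (by omega) (by omega) (by left; rfl)
  simpa using this

-- per-row: A's while-loops produce the map over consecutive stop pairs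
theorem aRow_eq (x y : List String) :
    ∀ fuel s t l, y.length - s ≤ fuel →
      aRow x y fuel s [t, l] =
        [t ++ ((stops y s).zip (stops y s).tail).map (fun p => segText x p.1 p.2),
         l ++ ((stops y s).zip (stops y s).tail).map (fun p => y.getD p.1 "")] := by
  intro fuel
  induction fuel with
  | zero =>
      intro s t l h
      have hs : ¬ s < y.length := by omega
      rw [stops, dif_neg hs]
      simp [aRow]
  | succ m ih =>
      intro s t l h
      by_cases hlt : s < y.length
      · have hstep : aRow x y (m + 1) s [t, l] =
            aRow x y m (aInner x y s (y.length - s) s "").2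
              [t ++ [(aInner x y s (y.length - s) s "").1], l ++ [y.getD s ""]] := by
          simp only [aRow]
          rw [if_pos hlt]
          rfl
        rw [hstep]
        rw [aInner_eq x y s (y.length - s) s "" (by omega)]
        set e := nxt y s s with he
        have hse : s < e := nxt_gt y s hlt
        obtain ⟨tl, htl⟩ := stops_cons y e
        have hstops : stops y s = s :: stops y e := by rw [stops, dif_pos hlt]
        rw [ih e (t ++ [("" : String) ++ segText x s e]) (l ++ [y.getD s ""]) (by omega)]
        rw [hstops, htl]
        simp [List.append_assoc, segText]
      · rw [stops, dif_neg hlt]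
        simp [aRow, hlt]

-- generic: B's inner foldl appends the two maps
theorem foldB (f1 f2 : Nat × Nat → String) :
    ∀ (ps : List (Nat × Nat)) (acc : List String × List String),
      ps.foldl (fun a se => (a.1 ++ [f1 se], a.2 ++ [f2 se])) acc =
        (acc.1 ++ ps.map f1, acc.2 ++ ps.map f2) := by
  intro ps
  induction ps with
  | nil => intro acc; simp
  | cons p ps ih => intro acc; simp [ih, List.append_assoc]

-- the two per-row segment lists (shared shape of both sides after rewriting)
def rowTexts (x y : List String) : List String :=
  ((stops y 0).zip (stops y 0).tail).map (fun p => segText x p.1 p.2)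
def rowLabels (y : List String) : List String :=
  ((stops y 0).zip (stops y 0).tail).map (fun p => y.getD p.1 "")

-- outer loops: A's indexed fold over rows equals B's fold over the zipped rows
theorem rows (d0 d1 : List (List String)) (hlen : d0.length ≤ d1.length) :
    ∀ fuel s t l, s ≤ d0.length → d0.length - s ≤ fuel →
      (List.range' s (d0.length - s)).foldl
        (fun ans index =>
          aRow (d0.getD index []) (d1.getD index []) (d1.getD index []).length 0 ans) [t, l] =
      (fun (r : List String × List String) => [r.1, r.2])
        (((d0.drop s).zip (d1.drop s)).foldl
          (fun (acc : List String × List String) (p : List String × List String) =>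
            let bs := bBounds p.2
            (bs.zip bs.tail).foldl
              (fun (acc2 : List String × List String) (se : Nat × Nat) =>
                (acc2.1 ++ [String.join ((List.range' se.1 (se.2 - se.1)).map
                    (fun k => p.1.getD k "" ++ " "))],
                 acc2.2 ++ [p.2.getD se.1 ""]))
              acc)
          (t, l)) := by
  intro fuel
  induction fuel with
  | zero =>
      intro s t l h1 h2
      have hs : s = d0.length := by omega
      subst hs
      rw [List.drop_length, show d0.length - d0.length = 0 from by omega]
      simp
  | succ m ih =>
      intro s t l h1 h2
      by_cases hlt : s < d0.length
      · have hlt1 : s < d1.length := by omega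
        have hr : List.range' s (d0.length - s) =
            s :: List.range' (s + 1) (d0.length - (s + 1)) := by
          have : d0.length - s = (d0.length - (s + 1)) + 1 := by omega
          rw [this, List.range'_succ]
        rw [hr]
        rw [List.drop_eq_getElem_cons hlt, List.drop_eq_getElem_cons hlt1]
        simp only [List.foldl_cons, List.zip_cons_cons]
        rw [aRow_eq (d0.getD s []) (d1.getD s []) (d1.getD s []).length 0 t l (by omega)]
        rw [ih (s + 1) _ _ (by omega) (by omega)]
        congr 2
        rw [foldB, bounds_eq_stops]
        rw [List.getD_eq_getElem d0 [] hlt, List.getD_eq_getElem d1 [] hlt1]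
        rfl
      · have hs : s = d0.length := by omega
        subst hs
        rw [List.drop_length, show d0.length - d0.length = 0 from by omega]
        simp

-- ===== VERDICT (by name: the statement is the Claim_ definition above) =====
theorem large_window_spec : Claim_equal_large_window := by
  intro data _hDom hPre
  obtain ⟨hne, hlen, _⟩ := hPre
  have hhead : data.headI = data.getD 0 [] := by
    cases data with
    | nil => simp at hne
    | cons a t => rfl
  rw [hhead] at hlen
  have h := rows (data.getD 0 []) (data.getD 1 []) hlen
    ((data.getD 0 []).length) 0 [] [] (by omega) (by omega)
  simp only [Nat.sub_zero, List.drop_zero] at h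
  unfold Spec_large_window large_window large_window_alt
  rw [List.range_eq_range']
  simpa using h
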